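-- pv_equiv track=rewrite | github.com/GonzaloMBustos/software-engineering-2 | P1.py | exercise8
-- ===== SOURCE A (Python) =====
-- def exercise8(k: int, j: int) -> int:
--     r: int = 1
--     if k != 0 and k > 0: #C1
--         c: int = k % 3 # k modulo 3
--         i: int = 0
--         while i < c: #C2
--             r = r * j
--             i = i +1
--     return r
-- ===== SOURCE B (Python) =====
-- def exercise8(k: int, j: int) -> int:
--     return j ** (k % 3) if k > 0 else 1
-- ===== Notes on version B (the rewrite author's own statement) =====
-- stated objective: simpler
-- what changed: Replaces the accumulator while-loop with a closed-form power expression j ** (k % 3), guarded by k > 0.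
import Mathlib
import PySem

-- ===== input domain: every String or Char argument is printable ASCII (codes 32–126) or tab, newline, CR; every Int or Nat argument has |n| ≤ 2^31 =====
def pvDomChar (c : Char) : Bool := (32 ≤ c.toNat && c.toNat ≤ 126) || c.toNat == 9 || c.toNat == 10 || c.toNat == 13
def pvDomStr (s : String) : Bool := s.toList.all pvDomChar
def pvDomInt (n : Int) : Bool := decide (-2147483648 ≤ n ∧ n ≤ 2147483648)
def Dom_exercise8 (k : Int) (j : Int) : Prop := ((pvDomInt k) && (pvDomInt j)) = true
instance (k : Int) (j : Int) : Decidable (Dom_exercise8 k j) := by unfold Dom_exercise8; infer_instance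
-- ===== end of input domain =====

-- B replaces A's multiply-accumulate while-loop by the closed-form power j ^ (k mod 3); simpler.

-- ===== PORT A =====
-- the while loop 'while i < c: r = r * j; i = i + 1' runs (c - i) times; ported as
-- structural recursion on the remaining iteration count
def exercise8_loop (n : Nat) (r : Int) (j : Int) : Int :=
  match n with
  | 0 => r
  | Nat.succ m => exercise8_loop m (r * j) j

def exercise8 (k : Int) (j : Int) : Int :=
  if k ≠ 0 ∧ k > 0 then
    exercise8_loop (PySem.Int.mod k 3).toNat 1 j
  else 1

-- ===== PORT B =====
def exercise8_alt (k : Int) (j : Int) : Int :=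
  if k > 0 then j ^ (PySem.Int.mod k 3).toNat else 1

-- ===== PRECONDITION & SPEC =====
def Spec_exercise8 (k : Int) (j : Int) (out : Int) : Prop := out = exercise8_alt k j
instance (k : Int) (j : Int) (out : Int) : Decidable (Spec_exercise8 k j out) := by unfold Spec_exercise8; infer_instance

-- ===== CLAIM (what is proved, stated in full; the proofs are below) =====
def Claim_equal_exercise8 : Prop := ∀ (k : Int) (j : Int), Dom_exercise8 k j → Spec_exercise8 k j (exercise8 k j)

-- ===== LEMMAS AND PROOFS =====
theorem exercise8_loop_eq (n : Nat) (r j : Int) : exercise8_loop n r j = r * j ^ n := by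
  induction n generalizing r with
  | zero => simp [exercise8_loop]
  | succ m ih => simp [exercise8_loop, ih, pow_succ]; ring

-- ===== VERDICT (by name: the statement is the Claim_ definition above) =====
theorem exercise8_spec : Claim_equal_exercise8 := by
  intro k j _
  unfold Spec_exercise8 exercise8 exercise8_alt
  by_cases hk : k > 0
  · have : k ≠ 0 := by omega
    simp [hk, this, exercise8_loop_eq]
  · simp [hk]
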